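-- pv_equiv track=rewrite | github.com/inbn6619/algorithm | 프로그래머스/성공/짝지어 제거하기.py | solution
-- ===== SOURCE A (Python) =====
-- def solution(s):
--     stack = list()
--
--     char = ""
--
--     for i in s:
--         if char != i:
--             stack.append(i)
--         else:
--             stack.pop()
--
--         if stack:
--             char = stack[-1]
--         else:
--             char = ""
--
--     if stack:
--         answer = 0
--     else:
--         answer = 1
--
--     return answer
-- ===== SOURCE B (Python) =====
-- def _one_pass(s):
--     # delete all non-overlapping adjacent equal pairs in one left-to-right scan
--     out = []
--     i = 0
--     n = len(s)
--     while i < n: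
--         if i + 1 < n and s[i] == s[i + 1]:
--             i += 2
--         else:
--             out.append(s[i])
--             i += 1
--     return ''.join(out)
--
--
-- def solution(s):
--     while True:
--         t = _one_pass(s)
--         if t == s:
--             return 1 if s == '' else 0
--         s = t
-- ===== Notes on version B (the rewrite author's own statement) =====
-- stated objective: alternative
-- what changed: Replaces the single-pass stack with iterated global pair-removal: repeatedly delete all non-overlapping adjacent equal pairs in whole-string scans until a fixed point, then answer 1 iff the fixed point is empty (confluence of the reduction gives the same result).
import Mathlib
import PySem

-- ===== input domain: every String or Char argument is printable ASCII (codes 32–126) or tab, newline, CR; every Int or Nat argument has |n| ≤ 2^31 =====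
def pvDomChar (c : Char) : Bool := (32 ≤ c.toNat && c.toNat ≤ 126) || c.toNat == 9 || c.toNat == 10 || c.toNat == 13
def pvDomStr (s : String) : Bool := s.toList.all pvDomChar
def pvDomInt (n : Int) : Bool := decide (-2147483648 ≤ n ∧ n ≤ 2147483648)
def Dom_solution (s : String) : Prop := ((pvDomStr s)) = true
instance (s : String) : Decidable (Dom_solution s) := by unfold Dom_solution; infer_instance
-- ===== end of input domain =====

-- B replaces A's single-pass stack by iterated whole-string removal of adjacent equal
-- pairs to a fixed point (alternative algorithm, same result; not faster).

-- ===== PORT A =====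
-- A's `char` is a Python string that is either "" or the 1-char top of the stack;
-- modeled as Option Char (none = "", exact since `i` is always a single char ≠ "").
def stepA (p : List Char × Option Char) (i : Char) : List Char × Option Char :=
  let st := if p.2 ≠ some i then p.1 ++ [i] else p.1.dropLast
  (st, st.getLast?)

def solution (s : String) : Int :=
  let p := s.toList.foldl stepA ([], none)
  if p.1 ≠ [] then 0 else 1

-- ===== PORT B =====
-- Source B's `_one_pass`: one left-to-right scan deleting all non-overlapping adjacent equal pairs
def passB : List Char → List Char
  | a :: b :: r => if a = b then passB r else a :: passB (b :: r)
  | xs => xs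

theorem passB_len (xs : List Char) : (passB xs).length ≤ xs.length := by
  induction xs using passB.induct with
  | case1 a r ih => simp [passB]; omega
  | case2 a b r h ih => simp [passB, h]; simp at ih; omega
  | case3 xs h =>
    match xs, h with
    | [], _ => simp [passB]
    | [a], _ => simp [passB]
    | a :: b :: r, h => exact absurd rfl (h a b r)

theorem passB_eq_or_lt (xs : List Char) : passB xs = xs ∨ (passB xs).length < xs.length := by
  induction xs using passB.induct with
  | case1 a r _ =>
    right
    have := passB_len r
    simp [passB]; omega
  | case2 a b r h ih =>
    rcases ih with h1 | h1
    · left; simp [passB, h, h1]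
    · right; simp [passB, h]; simp at h1; omega
  | case3 xs h =>
    match xs, h with
    | [], _ => left; rfl
    | [a], _ => left; rfl
    | a :: b :: r, h => exact absurd rfl (h a b r)

-- Source B's `while True` loop: iterate the pass until the string no longer changes
def fixB (xs : List Char) : List Char :=
  if _h : passB xs = xs then xs else fixB (passB xs)
termination_by xs.length
decreasing_by
  rcases passB_eq_or_lt xs with he | hl
  · exact absurd he _h
  · exact hl

def solution_alt (s : String) : Int :=
  if fixB s.toList = [] then 1 else 0

-- ===== PRECONDITION & SPEC =====
def Spec_solution (s : String) (out : Int) : Prop := out = solution_alt s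
instance (s : String) (out : Int) : Decidable (Spec_solution s out) := by unfold Spec_solution; infer_instance

-- ===== CLAIM (what is proved, stated in full; the proofs are below) =====
def Claim_equal_solution : Prop := ∀ (s : String), Dom_solution s → Spec_solution s (solution s)

-- ===== LEMMAS AND PROOFS =====

-- the canonical stack step, on a stack with its top at the head
def step (S : List Char) (c : Char) : List Char :=
  if S.head? = some c then S.tail else c :: S

-- stacks arising during the run never hold two adjacent equal chars
def noAdj (S : List Char) : Prop := List.IsChain (· ≠ ·) S

theorem noAdj_step (S : List Char) (c : Char) (h : noAdj S) : noAdj (step S c) := by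
  unfold step
  split_ifs with hh
  · cases S with
    | nil => simp [noAdj]
    | cons d t => exact h.of_cons
  · cases S with
    | nil => simp [noAdj]
    | cons d t =>
      refine List.isChain_cons_cons.mpr ⟨?_, h⟩
      intro he; exact hh (by simp [he])

theorem step_step (S : List Char) (c : Char) (h : noAdj S) : step (step S c) c = S := by
  by_cases h1 : S.head? = some c
  · cases S with
    | nil => simp at h1
    | cons d t =>
      simp at h1; subst h1
      have ht : ¬ t.head? = some d := by
        cases t with
        | nil => simp
        | cons e u =>
          simp
          exact fun he => (List.isChain_cons_cons.mp h).1 he.symm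
      simp [step, ht]
  · simp [step, h1]

theorem pass_fold (xs : List Char) : ∀ S, noAdj S → List.foldl step S (passB xs) = List.foldl step S xs := by
  induction xs using passB.induct with
  | case1 a r ih =>
    intro S hS
    have h2 : List.foldl step S (a :: a :: r) = List.foldl step S r := by
      simp [List.foldl, step_step S a hS]
    rw [show passB (a :: a :: r) = passB r from by simp [passB], ih S hS, h2]
  | case2 a b r h ih =>
    intro S hS
    rw [show passB (a :: b :: r) = a :: passB (b :: r) from by simp [passB, h]]
    simp only [List.foldl]
    exact ih (step S a) (noAdj_step S a hS)
  | case3 xs h =>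
    intro S _
    match xs, h with
    | [], _ => rfl
    | [a], _ => rfl
    | a :: b :: r, h => exact absurd rfl (h a b r)

theorem fix_fold (xs : List Char) : List.foldl step [] (fixB xs) = List.foldl step [] xs := by
  induction xs using fixB.induct with
  | case1 xs h => rw [fixB]; simp [h]
  | case2 xs h ih =>
    rw [fixB]; simp only [h, dite_false]
    rw [ih, pass_fold xs [] (by simp [noAdj])]

theorem fix_fixpoint (xs : List Char) : passB (fixB xs) = fixB xs := by
  induction xs using fixB.induct with
  | case1 xs h => rw [fixB]; simp [h]
  | case2 xs h ih => rw [fixB]; simp only [h, dite_false]; exact ih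

theorem noAdj_of_passB_eq (ys : List Char) (h : passB ys = ys) : noAdj ys := by
  induction ys using passB.induct with
  | case1 a r _ =>
    exfalso
    rw [show passB (a :: a :: r) = passB r from by simp [passB]] at h
    have := passB_len r
    have : (passB r).length ≤ r.length := this
    rw [h] at this; simp at this
  | case2 a b r hab ih =>
    rw [show passB (a :: b :: r) = a :: passB (b :: r) from by simp [passB, hab]] at h
    have h2 : passB (b :: r) = b :: r := by
      injection h
    exact List.isChain_cons_cons.mpr ⟨hab, ih h2⟩
  | case3 ys hc =>
    match ys, hc with
    | [], _ => simp [noAdj]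
    | [a], _ => simp [noAdj]
    | a :: b :: r, hc => exact absurd rfl (hc a b r)

theorem fold_noAdj (ys : List Char) : ∀ S, noAdj ys → (∀ c d, ys.head? = some c → S.head? = some d → d ≠ c) →
    List.foldl step S ys = ys.reverse ++ S := by
  induction ys with
  | nil => intro S _ _; simp
  | cons c t ih =>
    intro S hchain hhd
    have hstep : step S c = c :: S := by
      unfold step
      split_ifs with h1
      · exfalso
        cases S with
        | nil => simp at h1
        | cons d u => simp at h1; exact (hhd c d rfl rfl) h1
      · rfl
    simp only [List.foldl, hstep]
    rw [ih (c :: S) ?_ ?_]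
    · simp
    · cases t with
      | nil => simp [noAdj]
      | cons e u => exact hchain.of_cons
    · intro e d he hd
      simp at hd; subst hd
      cases t with
      | nil => simp at he
      | cons e' u =>
        simp at he; subst he
        exact (List.isChain_cons_cons.mp hchain).1

theorem red_empty_iff (ys : List Char) (hc : noAdj ys) : List.foldl step [] ys = [] ↔ ys = [] := by
  constructor
  · intro h
    have := fold_noAdj ys [] hc (by intro c d _ hd; simp at hd)
    rw [this] at h
    simp at h
    exact List.reverse_eq_nil_iff.mp (by simpa using h)
  · intro h; subst h; rfl

-- A's fold equals the canonical stack fold (A's stack read back-to-front)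
theorem afold_eq (l : List Char) : ∀ st : List Char,
    (List.foldl stepA (st, st.getLast?) l).1 = (List.foldl step st.reverse l).reverse := by
  induction l with
  | nil => intro st; simp
  | cons i t ih =>
    intro st
    simp only [List.foldl]
    by_cases h : st.getLast? = some i
    · have hA : stepA (st, st.getLast?) i = (st.dropLast, st.dropLast.getLast?) := by
        simp [stepA, h]
      have hS : step st.reverse i = st.dropLast.reverse := by
        unfold step
        rw [List.head?_reverse, if_pos h, ← List.tail_reverse]
      rw [hA, ih st.dropLast, hS]
    · have hA : stepA (st, st.getLast?) i = (st ++ [i], (st ++ [i]).getLast?) := by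
        simp [stepA, h]
      have hS : step st.reverse i = (st ++ [i]).reverse := by
        unfold step
        rw [List.head?_reverse, if_neg h]
        simp
      rw [hA, ih (st ++ [i]), hS]

-- ===== VERDICT (by name: the statement is the Claim_ definition above) =====
theorem solution_spec : Claim_equal_solution := by
  intro s _
  unfold Spec_solution solution solution_alt
  have hA : (List.foldl stepA ([], none) s.toList).1 = (List.foldl step [] s.toList).reverse := by
    have := afold_eq s.toList []
    simpa using this
  have hiff : fixB s.toList = [] ↔ List.foldl step [] s.toList = [] := by
    constructor
    · intro h
      rw [← fix_fold, h]; rfl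
    · intro h
      have hfix : List.foldl step [] (fixB s.toList) = [] := by rw [fix_fold]; exact h
      have hnA : noAdj (fixB s.toList) := noAdj_of_passB_eq _ (fix_fixpoint _)
      exact (red_empty_iff _ hnA).mp hfix
  simp only [hA]
  by_cases h : List.foldl step [] s.toList = []
  · rw [if_pos (hiff.mpr h), h]; simp
  · rw [if_neg (fun hh => h (hiff.mp hh))]
    simp [h]
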